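-- pv_equiv track=rewrite | github.com/tinyplasticgreyknight/random-planar-graph | main.py | partition_edges_by_nodes
-- ===== SOURCE A (Python) =====
-- def partition_edges_by_nodes(nodes, edges):
-- 	adjacent = set() # edges which have one of those nodes
-- 	distant = set() # the remaining edges
-- 	for edge in edges:
-- 		if (edge[0] in nodes) or (edge[1] in nodes):
-- 			adjacent.add(edge)
-- 		else:
-- 			distant.add(edge)
-- 	return (adjacent, distant)
-- ===== SOURCE B (Python) =====
-- def partition_edges_by_nodes(nodes, edges):
--     # Inverted traversal: index the distinct edges by their endpoints once,
--     # then walk the NODES and collect every edge incident to one of them;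
--     # no per-edge membership scan over nodes remains.
--     distinct = list(dict.fromkeys(edges))
--     incident = {}
--     for e in distinct:
--         incident.setdefault(e[0], []).append(e)
--         if e[1] != e[0]:
--             incident.setdefault(e[1], []).append(e)
--     marked = set()
--     for n in nodes:
--         for e in incident.get(n, []):
--             marked.add(e)
--     adjacent = {e for e in distinct if e in marked}
--     distant = {e for e in distinct if e not in marked}
--     return (adjacent, distant)
-- ===== Notes on version B (the rewrite author's own statement) =====
-- stated objective: alternative
-- what changed: B inverts the traversal: it deduplicates the edges, builds an endpoint-to-edges index over them once, then iterates over the NODES collecting incident edges from the index (the per-edge membership test over nodes disappears), and finally splits the distinct edges by the collected mark set.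
import Mathlib
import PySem

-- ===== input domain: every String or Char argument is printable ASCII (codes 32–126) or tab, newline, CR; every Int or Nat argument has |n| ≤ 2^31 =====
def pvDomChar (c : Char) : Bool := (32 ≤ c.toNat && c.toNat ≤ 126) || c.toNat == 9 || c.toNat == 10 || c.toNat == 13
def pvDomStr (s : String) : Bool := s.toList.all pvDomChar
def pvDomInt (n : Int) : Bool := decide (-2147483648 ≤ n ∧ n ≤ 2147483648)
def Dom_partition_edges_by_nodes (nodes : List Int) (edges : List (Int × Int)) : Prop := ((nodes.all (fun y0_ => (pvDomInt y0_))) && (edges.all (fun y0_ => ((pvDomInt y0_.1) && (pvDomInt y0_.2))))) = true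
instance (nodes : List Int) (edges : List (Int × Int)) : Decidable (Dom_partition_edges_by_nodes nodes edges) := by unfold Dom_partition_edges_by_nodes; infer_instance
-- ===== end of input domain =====

-- ===== PORT A =====
-- A: one pass over edges, branching each edge into one of two sets by scanning nodes.
def partition_edges_by_nodes (nodes : List Int) (edges : List (Int × Int)) : (List (Int × Int)) × (List (Int × Int)) :=
  edges.foldl
    (fun st e =>
      if nodes.contains e.1 || nodes.contains e.2 then
        (PySem.Set.add st.1 e, st.2)
      else
        (st.1, PySem.Set.add st.2 e))
    (PySem.Set.empty, PySem.Set.empty)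

-- ===== PORT B =====
-- B: dedup the edges, build an endpoint→edges index over them (pvIndexStep is
-- 'incident.setdefault(e[0], []).append(e); if e[1] != e[0]: incident.setdefault(e[1], []).append(e)'),
-- then iterate over the NODES collecting incident edges into `marked`, and split the distinct edges by `marked`.
def pvIndexStep (d : PySem.Dict Int (List (Int × Int))) (e : Int × Int) : PySem.Dict Int (List (Int × Int)) :=
  let d1 := d.insert e.1 (d.getD e.1 [] ++ [e])
  if e.2 ≠ e.1 then d1.insert e.2 (d1.getD e.2 [] ++ [e]) else d1

def partition_edges_by_nodes_alt (nodes : List Int) (edges : List (Int × Int)) : (List (Int × Int)) × (List (Int × Int)) :=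
  let distinct : List (Int × Int) := PySem.List.dedup edges
  let incident : PySem.Dict Int (List (Int × Int)) := distinct.foldl pvIndexStep PySem.Dict.empty
  let marked : PySem.Set (Int × Int) :=
    nodes.foldl (fun s n => PySem.Set.update s (incident.getD n [])) PySem.Set.empty
  let adjacent : PySem.Set (Int × Int) :=
    PySem.Set.ofList (distinct.filter (fun e => PySem.Set.contains marked e))
  let distant : PySem.Set (Int × Int) :=
    PySem.Set.ofList (distinct.filter (fun e => !PySem.Set.contains marked e))
  (adjacent, distant)

-- ===== PRECONDITION & SPEC =====
def Spec_partition_edges_by_nodes (nodes : List Int) (edges : List (Int × Int)) (out : (List (Int × Int)) × (List (Int × Int))) : Prop := out = partition_edges_by_nodes_alt nodes edges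
instance (nodes : List Int) (edges : List (Int × Int)) (out : (List (Int × Int)) × (List (Int × Int))) : Decidable (Spec_partition_edges_by_nodes nodes edges out) := by unfold Spec_partition_edges_by_nodes; infer_instance

-- ===== CLAIM =====
def Claim_equal_partition_edges_by_nodes : Prop := ∀ (nodes : List Int) (edges : List (Int × Int)), Dom_partition_edges_by_nodes nodes edges → Spec_partition_edges_by_nodes nodes edges (partition_edges_by_nodes nodes edges)

-- ===== LEMMAS AND PROOFS =====

theorem pv_filter_ofList {α : Type} [BEq α] [LawfulBEq α] (q : α → Bool) (xs : List α) :
    List.filter q (PySem.Set.ofList xs) = PySem.Set.ofList (xs.filter q) := by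
  induction xs with
  | nil => rfl
  | cons x xs ih =>
    rw [PySem.Set.ofList_cons]
    by_cases hq : q x = true
    · simp only [List.filter_cons, hq, if_pos, PySem.Set.ofList_cons, PySem.Set.discard,
        List.filter_filter, ← ih]
      congr 1
      exact List.filter_congr (fun y _ => by rw [Bool.and_comm])
    · simp only [Bool.not_eq_true] at hq
      simp only [List.filter_cons, hq, Bool.false_eq_true, if_false, PySem.Set.discard,
        List.filter_filter, ← ih]
      refine List.filter_congr (fun y _ => ?_)
      by_cases hy : q y = true
      · have hne : (y == x) = false := by
          by_contra h
          simp only [Bool.not_eq_false, beq_iff_eq] at h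
          rw [h, hq] at hy; exact Bool.false_ne_true hy
        simp [hy, hne]
      · simp only [Bool.not_eq_true] at hy
        simp [hy]

theorem pv_fold_pair (p : (Int × Int) → Bool) (edges : List (Int × Int))
    (a d : List (Int × Int)) :
    edges.foldl
      (fun st e => if p e then (PySem.Set.add st.1 e, st.2) else (st.1, PySem.Set.add st.2 e))
      (a, d)
    = (PySem.Set.update a (edges.filter p),
       PySem.Set.update d (edges.filter (fun e => !(p e)))) := by
  induction edges generalizing a d with
  | nil => rfl
  | cons e es ih =>
    by_cases he : p e = true
    · simp [he, ih, PySem.Set.update_cons]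
    · simp only [Bool.not_eq_true] at he
      simp [he, ih, PySem.Set.update_cons]

-- one index-building step appends e to exactly the buckets of its endpoints
theorem pv_indexStep_getD (d : PySem.Dict Int (List (Int × Int))) (e : Int × Int) (n : Int) :
    (pvIndexStep d e).getD n []
    = d.getD n [] ++ (if (e.1 == n || e.2 == n) then [e] else []) := by
  unfold pvIndexStep
  by_cases h21 : e.2 = e.1
  · rw [if_neg (by simp [h21])]
    rw [PySem.Dict.getD_insert]
    by_cases h1 : n = e.1
    · rw [if_pos h1, if_pos (by simp [h1, h21]), h1]
    · rw [if_neg h1, if_neg (by simp [h21]; omega), List.append_nil]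
  · rw [if_pos (by simpa using h21)]
    simp only [PySem.Dict.getD_insert]
    by_cases h2 : n = e.2
    · rw [if_pos h2, if_neg (fun h : e.2 = e.1 => h21 h),
        if_pos (by simp [h2]), h2]
    · by_cases h1 : n = e.1
      · rw [if_neg h2, if_pos h1, if_pos (by simp [h1]), h1]
      · rw [if_neg h2, if_neg h1, if_neg (by simp; omega), List.append_nil]

-- the bucket of n in the endpoint index is exactly the incident distinct edges, in order
theorem pv_bucket (xs : List (Int × Int)) (d : PySem.Dict Int (List (Int × Int))) (n : Int) :
    (xs.foldl pvIndexStep d).getD n []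
    = d.getD n [] ++ xs.filter (fun e => e.1 == n || e.2 == n) := by
  induction xs generalizing d with
  | nil => simp
  | cons e es ih =>
    rw [List.foldl_cons, ih, pv_indexStep_getD, List.filter_cons, List.append_assoc]
    by_cases hq : (e.1 == n || e.2 == n) = true
    · simp [hq]
    · simp only [Bool.not_eq_true] at hq
      simp [hq]

-- membership in the node-loop accumulation
theorem pv_marked_mem (g : Int → List (Int × Int)) (nodes : List Int)
    (s : PySem.Set (Int × Int)) (x : Int × Int) :
    (x ∈ nodes.foldl (fun s n => PySem.Set.update s (g n)) s)
    ↔ x ∈ s ∨ ∃ n ∈ nodes, x ∈ g n := by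
  induction nodes generalizing s with
  | nil => simp
  | cons n ns ih =>
    rw [List.foldl_cons, ih, PySem.Set.mem_update]
    constructor
    · rintro ((h | h) | ⟨m, hm, hx⟩)
      · exact Or.inl h
      · exact Or.inr ⟨n, List.mem_cons_self .., h⟩
      · exact Or.inr ⟨m, List.mem_cons_of_mem _ hm, hx⟩
    · rintro (h | ⟨m, hm, hx⟩)
      · exact Or.inl (Or.inl h)
      · rcases List.mem_cons.mp hm with h | h
        · exact Or.inl (Or.inr (h ▸ hx))
        · exact Or.inr ⟨m, h, hx⟩

-- for a distinct edge, membership in `marked` is exactly A's endpoint test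
theorem pv_marked_contains (nodes : List Int) (edges : List (Int × Int))
    (e : Int × Int) (he : e ∈ PySem.List.dedup edges) :
    PySem.Set.contains
      (nodes.foldl
        (fun s n =>
          PySem.Set.update s
            (((PySem.List.dedup edges).foldl pvIndexStep PySem.Dict.empty).getD n []))
        PySem.Set.empty) e
    = (nodes.contains e.1 || nodes.contains e.2) := by
  simp only [PySem.Set.contains]
  rw [Bool.eq_iff_iff, List.contains_iff_mem,
    pv_marked_mem (fun n => ((PySem.List.dedup edges).foldl pvIndexStep PySem.Dict.empty).getD n [])]
  constructor
  · rintro (h | ⟨n, hn, hx⟩)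
    · exact absurd h (List.not_mem_nil)
    · rw [pv_bucket] at hx
      simp only [PySem.Dict.getD_empty, List.nil_append, List.mem_filter] at hx
      rcases hx with ⟨_, hq⟩
      simp only [Bool.or_eq_true, beq_iff_eq] at hq
      simp only [Bool.or_eq_true, List.contains_iff_mem]
      rcases hq with h1 | h2
      · exact Or.inl (h1 ▸ hn)
      · exact Or.inr (h2 ▸ hn)
  · intro h
    simp only [Bool.or_eq_true, List.contains_iff_mem] at h
    refine Or.inr ?_
    rcases h with h1 | h2
    · exact ⟨e.1, h1, by
        rw [pv_bucket]
        simpa [List.mem_filter] using he⟩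
    · exact ⟨e.2, h2, by
        rw [pv_bucket]
        simpa [List.mem_filter] using he⟩

-- ===== VERDICT =====
theorem partition_edges_by_nodes_spec : Claim_equal_partition_edges_by_nodes := by
  intro nodes edges _
  unfold Spec_partition_edges_by_nodes
  simp only [partition_edges_by_nodes, partition_edges_by_nodes_alt]
  rw [pv_fold_pair (fun e => nodes.contains e.1 || nodes.contains e.2) edges
    PySem.Set.empty PySem.Set.empty]
  have hpos : List.filter
      (fun e => PySem.Set.contains
        (nodes.foldl
          (fun s n =>
            PySem.Set.update s
              (((PySem.List.dedup edges).foldl pvIndexStep PySem.Dict.empty).getD n []))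
          PySem.Set.empty) e)
      (PySem.List.dedup edges)
      = List.filter (fun e => nodes.contains e.1 || nodes.contains e.2) (PySem.List.dedup edges) :=
    List.filter_congr (fun e he => pv_marked_contains nodes edges e he)
  have hneg : List.filter
      (fun e => !PySem.Set.contains
        (nodes.foldl
          (fun s n =>
            PySem.Set.update s
              (((PySem.List.dedup edges).foldl pvIndexStep PySem.Dict.empty).getD n []))
          PySem.Set.empty) e)
      (PySem.List.dedup edges)
      = List.filter (fun e => !(nodes.contains e.1 || nodes.contains e.2)) (PySem.List.dedup edges) :=
    List.filter_congr (fun e he => by rw [pv_marked_contains nodes edges e he])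
  rw [hpos, hneg, PySem.List.dedup_eq_ofList, pv_filter_ofList, pv_filter_ofList,
    PySem.Set.ofList_ofList, PySem.Set.ofList_ofList]
  rfl
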